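-- pv_equiv track=rewrite | github.com/PlebeiusGaragicus/nospy | nospy/commands/keygen.py | format_seed_words
-- ===== SOURCE A (Python) =====
-- def format_seed_words(words, num_columns=3):
--     num_words = len(words)
--     words_per_column = (num_words + num_columns - 1) // num_columns
--     max_number_width = len(str(num_words))
--
--     # Calculate the maximum word length in each column
--     max_word_lengths = [0] * num_columns
--     for col in range(num_columns):
--         start = col * words_per_column
--         end = min((col + 1) * words_per_column, num_words)
--         max_word_lengths[col] = max(len(words[i]) for i in range(start, end))
--
--     formatted_words = ""
--     for row in range(words_per_column):
--         line = ""
--         for col in range(num_columns):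
--             index = row + col * words_per_column
--             if index < num_words:
--                 number = f"{index + 1:>{max_number_width}}"
--                 word = words[index].ljust(max_word_lengths[col])
--                 line += f"{number}. {word}  "
--         formatted_words += line.rstrip() + "\n"
--
--     return formatted_words
-- ===== SOURCE B (Python) =====
-- def format_seed_words(words, num_columns=3):
--     # Column-major build: pre-slice the words into columns, then append each
--     # column's formatted cells onto a per-row line buffer; join at the end.
--     n = len(words)
--     wpc = -(-n // num_columns)
--     nw = len(str(n))
--     lines = [""] * wpc
--     start = 0
--     for c in range(num_columns):
--         col = words[c * wpc:(c + 1) * wpc]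
--         width = max(len(w) for w in col)
--         for i, w in enumerate(col):
--             lines[i] += f"{start + i + 1:>{nw}}. {w.ljust(width)}  "
--         start += len(col)
--     return "".join(line.rstrip() + "\n" for line in lines)
-- ===== Notes on version B (the rewrite author's own statement) =====
-- stated objective: alternative
-- what changed: B pre-slices the words into explicit per-column lists and builds the output column-major, appending each column's pre-formatted cells onto per-row line buffers, instead of A's row-major nested loop with arithmetic index = row + col*words_per_column.
-- intended difference: On num_columns < 0 with at most one word, A returns one or more bare newline lines produced by accidental floor-division row counts while B returns ''; no columns were requested, so B's empty output is the intended value of this unspecified corner. — e.g. on format_seed_words(["a"], -1): A returns "\n", B returns ""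
import Mathlib
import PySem

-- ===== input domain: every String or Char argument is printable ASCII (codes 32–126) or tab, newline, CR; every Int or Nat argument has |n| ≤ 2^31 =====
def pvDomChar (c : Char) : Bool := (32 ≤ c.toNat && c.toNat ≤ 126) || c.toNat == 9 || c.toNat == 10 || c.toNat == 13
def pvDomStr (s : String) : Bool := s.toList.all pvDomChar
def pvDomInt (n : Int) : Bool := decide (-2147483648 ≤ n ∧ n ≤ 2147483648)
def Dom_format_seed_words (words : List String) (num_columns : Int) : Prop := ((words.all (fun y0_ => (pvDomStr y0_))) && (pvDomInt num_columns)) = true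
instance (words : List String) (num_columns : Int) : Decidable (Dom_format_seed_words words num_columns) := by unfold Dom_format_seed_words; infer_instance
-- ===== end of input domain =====

-- B rebuilds the table column-major (slice each column once, append its pre-formatted
-- cells onto per-row line buffers) instead of A's row-major arithmetic indexing; objective: idiomatic/alternative.

-- s.ljust(w) (pad right with spaces; exact for w - len ≤ 0 too)
def pvLjust (s : List Char) (w : Int) : List Char := s ++ List.replicate (w - s.length).toNat ' '
-- f"{v:>{w}}" on an int v (right-justify with spaces)
def pvRjust (s : List Char) (w : Int) : List Char := List.replicate (w - s.length).toNat ' ' ++ s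

-- ===== PORT A =====
-- note: Python's max(...) raises on an empty range; the port's `foldl max 0` returns 0
-- there — such inputs are excluded by Pre_format_seed_words.
def format_seed_words (words : List String) (num_columns : Int) : String :=
  let num_words : Int := (words.length : Int)
  let wpc : Int := PySem.Int.floordiv (num_words + num_columns - 1) num_columns
  let maxNumberWidth : Int := ((PySem.Int.toChars num_words).length : Int)
  let maxWordLengths : List Int := (PySem.List.pyRange 0 num_columns 1).map (fun col =>
    ((PySem.List.pyRange (col * wpc) (min ((col + 1) * wpc) num_words) 1).map
      (fun i => ((PySem.List.pyGetD words i "").toList.length : Int))).foldl max 0)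
  let formatted : List Char := (PySem.List.pyRange 0 wpc 1).foldl (fun acc row =>
    let line : List Char := (PySem.List.pyRange 0 num_columns 1).foldl (fun line col =>
      if row + col * wpc < num_words then
        line ++ pvRjust (PySem.Int.toChars (row + col * wpc + 1)) maxNumberWidth
             ++ ('.' :: ' ' :: pvLjust (PySem.List.pyGetD words (row + col * wpc) "").toList
                  (PySem.List.pyGetD maxWordLengths col 0))
             ++ [' ', ' ']
      else line) []
    acc ++ PySem.Chars.rstrip line ++ ['\n']) []
  String.ofList formatted

-- ===== PORT B =====
def format_seed_words_alt (words : List String) (num_columns : Int) : String :=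
  let n : Int := (words.length : Int)
  let wpc : Int := -(PySem.Int.floordiv (-n) num_columns)
  let nw : Int := ((PySem.Int.toChars n).length : Int)
  let final := (PySem.List.pyRange 0 num_columns 1).foldl
    (fun (st : List (List Char) × Int) c =>
      let col := PySem.List.slice words (some (c * wpc)) (some ((c + 1) * wpc))
      let width : Int := (col.map (fun w => (w.toList.length : Int))).foldl max 0
      ((PySem.List.enumerate col).foldl (fun (ls : List (List Char)) iw =>
          ls.set iw.1.toNat (ls.getD iw.1.toNat []
            ++ pvRjust (PySem.Int.toChars (st.2 + iw.1 + 1)) nw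
            ++ ('.' :: ' ' :: pvLjust iw.2.toList width) ++ [' ', ' '])) st.1,
       st.2 + (col.length : Int)))
    (List.replicate wpc.toNat ([] : List Char), 0)
  String.ofList (PySem.Chars.join [] (final.1.map (fun l => PySem.Chars.rstrip l ++ ['\n'])))

-- ===== PRECONDITION & SPEC =====
-- Pre_ excludes only inputs where BOTH programs raise: num_columns = 0 (ZeroDivisionError)
-- and positive num_columns whose last column(s) would be empty (max() of an empty sequence,
-- ValueError in A and in B alike).
def Pre_format_seed_words (words : List String) (num_columns : Int) : Prop :=
  num_columns ≠ 0 ∧ (0 < num_columns →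
    0 < words.length ∧
    (num_columns - 1) * PySem.Int.floordiv ((words.length : Int) + num_columns - 1) num_columns
      < (words.length : Int))
instance (words : List String) (num_columns : Int) : Decidable (Pre_format_seed_words words num_columns) := by unfold Pre_format_seed_words; infer_instance
def pvWitness_format_seed_words : List String × Int := (["apple", "banana", "fig", "kiwi", "plum"], 2)

-- On num_columns < 0 with at most one word, A returns one "\n" per (meaningless, floor-division
-- produced) row count while B returns ""; no columns were requested, so B's empty output is the
-- intended value of this unspecified corner.
def D_format_seed_words (words : List String) (num_columns : Int) : Prop :=
  num_columns < 0 ∧ words.length ≤ 1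
instance (words : List String) (num_columns : Int) : Decidable (D_format_seed_words words num_columns) := by unfold D_format_seed_words; infer_instance

def Spec_format_seed_words (words : List String) (num_columns : Int) (out : String) : Prop :=
  ¬ D_format_seed_words words num_columns → out = format_seed_words_alt words num_columns
instance (words : List String) (num_columns : Int) (out : String) : Decidable (Spec_format_seed_words words num_columns out) := by unfold Spec_format_seed_words; infer_instance

def pvDiffWitness_format_seed_words : List String × Int := (["a"], -1)
def pvDiffWitnessOut_format_seed_words : String × String := ("\n", "")

-- ===== CLAIM =====
def Claim_unchanged_format_seed_words : Prop := ∀ (words : List String) (num_columns : Int), Dom_format_seed_words words num_columns → Pre_format_seed_words words num_columns → Spec_format_seed_words words num_columns (format_seed_words words num_columns)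
def Claim_changed_format_seed_words : Prop := Dom_format_seed_words (pvDiffWitness_format_seed_words.1) (pvDiffWitness_format_seed_words.2) ∧ Pre_format_seed_words (pvDiffWitness_format_seed_words.1) (pvDiffWitness_format_seed_words.2) ∧ D_format_seed_words (pvDiffWitness_format_seed_words.1) (pvDiffWitness_format_seed_words.2) ∧ format_seed_words (pvDiffWitness_format_seed_words.1) (pvDiffWitness_format_seed_words.2) = pvDiffWitnessOut_format_seed_words.1 ∧ format_seed_words_alt (pvDiffWitness_format_seed_words.1) (pvDiffWitness_format_seed_words.2) = pvDiffWitnessOut_format_seed_words.2 ∧ pvDiffWitnessOut_format_seed_words.1 ≠ pvDiffWitnessOut_format_seed_words.2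
def Claim_exact_format_seed_words : Prop := ∀ (words : List String) (num_columns : Int), Dom_format_seed_words words num_columns → Pre_format_seed_words words num_columns → D_format_seed_words words num_columns → format_seed_words words num_columns ≠ format_seed_words_alt words num_columns


-- ===== LEMMAS AND PROOFS =====

-- A-side pieces (n, nw kept as free parameters so the lemmas match the unfolded port)
def pvWidth (words : List String) (n W k : Int) : Int :=
  ((PySem.List.pyRange (k * W) (min ((k + 1) * W) n) 1).map
    (fun i => ((PySem.List.pyGetD words i "").toList.length : Int))).foldl max 0
def pvCell (words : List String) (n nw W r k : Int) : List Char :=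
  pvRjust (PySem.Int.toChars (r + k * W + 1)) nw
    ++ ('.' :: ' ' :: pvLjust (PySem.List.pyGetD words (r + k * W) "").toList (pvWidth words n W k))
    ++ [' ', ' ']
def pvLine (words : List String) (n nw c W r : Int) : List Char :=
  ((PySem.List.pyRange 0 c 1).filter (fun k => decide (r + k * W < n))).flatMap
    (pvCell words n nw W r)

-- B-side pieces
def pvColB (words : List String) (W k : Int) : List String :=
  PySem.List.slice words (some (k * W)) (some ((k + 1) * W))
def pvWidthB (words : List String) (W k : Int) : Int :=
  ((pvColB words W k).map (fun w => (w.toList.length : Int))).foldl max 0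
def pvCellB (words : List String) (nw W : Int) (r : Nat) (k : Int) : List Char :=
  pvRjust (PySem.Int.toChars (min (k * W) (words.length : Int) + (r : Int) + 1)) nw
    ++ ('.' :: ' ' :: pvLjust ((pvColB words W k).getD r "").toList (pvWidthB words W k))
    ++ [' ', ' ']
def pvPart (words : List String) (nw W : Int) (m r : Nat) : List Char :=
  ((PySem.List.pyRange 0 (m : Int) 1).filter
      (fun k => decide ((r : Int) < ((pvColB words W k).length : Int)))).flatMap
    (fun k => pvCellB words nw W r k)

theorem pv_join_nil (l : List (List Char)) : PySem.Chars.join [] l = l.flatten := by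
  simp [PySem.Chars.join, List.intercalate]
  induction l with
  | nil => simp
  | cons x t ih => cases t <;> simp_all [List.intersperse]

theorem pv_ceil_eq (n c : Int) (hc : 0 < c) :
    -(PySem.Int.floordiv (-n) c) = PySem.Int.floordiv (n + c - 1) c := by
  have h := (PySem.Int.floordiv_eq_iff_of_pos (a := n + c - 1) (b := c)
    (q := PySem.Int.floordiv (n + c - 1) c) hc).mp rfl
  rw [PySem.Int.neg_floordiv_neg_eq_iff_of_pos hc]
  constructor <;> nlinarith [h.1, h.2]

theorem pv_foldl_append_if_list {α : Type} (p : α → Bool) (g : α → List Char) (l : List α) (acc : List Char) :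
    l.foldl (fun acc x => if p x then acc ++ g x else acc) acc = acc ++ (l.filter p).flatMap g := by
  induction l generalizing acc with
  | nil => simp
  | cons x t ih =>
    by_cases h : p x <;> simp [h, ih, List.append_assoc]

theorem pv_flatMap_congr {α : Type} {f g : α → List Char} (l : List α)
    (h : ∀ x ∈ l, f x = g x) : l.flatMap f = l.flatMap g := by
  induction l with
  | nil => rfl
  | cons x t ih => simp_all

theorem pv_enum_cons {α : Type} (x : α) (t : List α) (k : Int) :
    PySem.List.enumerate (x :: t) k = (k, x) :: PySem.List.enumerate t (k + 1) := by
  simp [PySem.List.enumerate]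

theorem pv_enum_fold (g : Int → String → List Char) :
    ∀ (col : List String) (k : Nat) (ls : List (List Char)), (k + col.length ≤ ls.length) →
    (PySem.List.enumerate col (k : Int)).foldl
      (fun ls iw => ls.set iw.1.toNat (ls.getD iw.1.toNat [] ++ g iw.1 iw.2)) ls
    = ls.mapIdx (fun r l => if k ≤ r ∧ r < k + col.length then l ++ g r (col.getD (r - k) "") else l) := by
  intro col
  induction col with
  | nil =>
    intro k ls _
    simp [PySem.List.enumerate]
    apply List.ext_getElem (by simp)
    intro i h1 h2
    rw [List.getElem_mapIdx, if_neg (by omega)]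
  | cons x t ih =>
    intro k ls hlen
    rw [pv_enum_cons]
    simp only [List.foldl_cons]
    have hk : ((k : Int) + 1) = ((k + 1 : Nat) : Int) := by push_cast; ring
    rw [hk, ih (k+1) _ (by simp at hlen ⊢; omega)]
    apply List.ext_getElem (by simp)
    intro i h1 h2
    simp only [List.getElem_mapIdx]
    have hlsk : k < ls.length := by simp at hlen; omega
    by_cases hik : i = k
    · subst hik
      simp [List.getD_eq_getElem?_getD, List.getElem?_eq_getElem hlsk]
    · by_cases hmid : k + 1 ≤ i ∧ i < k + 1 + t.length
      · have hsub : i - k = (i - (k+1)) + 1 := by omega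
        simp only [List.getElem_set, List.getD_eq_getElem?_getD, hsub, List.getElem?_cons_succ]
        rw [if_pos (by omega), if_neg (fun h => hik h.symm), if_pos (by simp; omega)]
      · simp only [List.getElem_set, List.getD_eq_getElem?_getD]
        rw [if_neg (by omega), if_neg (fun h => hik h.symm), if_neg (by simp; omega)]

theorem pv_clampIdx_of_nonneg (n : Nat) (i : Int) (h : 0 ≤ i) :
    PySem.List.clampIdx n i = min i.toNat n := by
  simp [PySem.List.clampIdx]
  omega

theorem pv_colB_len (words : List String) (W k : Int) (hk : 0 ≤ k) (hW : 0 ≤ W) :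
    ((pvColB words W k).length : Int)
      = min ((k + 1) * W) (words.length : Int) - min (k * W) (words.length : Int) := by
  have h1 : (0:Int) ≤ k * W := mul_nonneg hk hW
  have h2 : k * W ≤ (k + 1) * W := by nlinarith
  rw [pvColB, PySem.List.length_slice,
      pv_clampIdx_of_nonneg _ _ h1, pv_clampIdx_of_nonneg _ _ (le_trans h1 h2)]
  omega

theorem pv_inner_line (words : List String) (n nw c W row : Int) :
    (PySem.List.pyRange 0 c 1).foldl
      (fun line col =>
        if row + col * W < n then
          line ++ pvRjust (PySem.Int.toChars (row + col * W + 1)) nw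
            ++ ('.' :: ' ' :: pvLjust (PySem.List.pyGetD words (row + col * W) "").toList
                 (PySem.List.pyGetD
                   ((PySem.List.pyRange 0 c 1).map (fun col =>
                     ((PySem.List.pyRange (col * W) (min ((col + 1) * W) n) 1).map
                       (fun i => ((PySem.List.pyGetD words i "").toList.length : Int))).foldl max 0))
                   col 0))
            ++ [' ', ' ']
        else line) []
    = pvLine words n nw c W row := by
  rw [PySem.List.foldl_congr_mem _ _
      (fun line col => if (decide (row + col * W < n) : Bool) then line ++ pvCell words n nw W row col else line) _
      ?hfun]
  · rw [pv_foldl_append_if_list]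
    rfl
  · intro acc k hk
    obtain ⟨hk0, hkc⟩ := PySem.List.mem_pyRange_one.mp hk
    rw [PySem.List.pyGetD_map_pyRange_of_nonneg _ c k 0 hk0 hkc]
    by_cases h : row + k * W < n
    · simp only [h, decide_true, if_pos, if_true]
      simp [pvCell, pvWidth, List.append_assoc]
    · simp [h]

theorem pv_A_char (words : List String) (c : Int) (hc : 0 < c) :
    format_seed_words words c = String.ofList
      ((PySem.List.pyRange 0 (PySem.Int.floordiv ((words.length : Int) + c - 1) c) 1).flatMap
        (fun r => PySem.Chars.rstrip
            (pvLine words (words.length : Int) ((PySem.Int.toChars (words.length : Int)).length : Int)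
              c (PySem.Int.floordiv ((words.length : Int) + c - 1) c) r)
          ++ ['\n'])) := by
  simp only [format_seed_words]
  refine congrArg String.ofList ?_
  rw [PySem.List.foldl_congr_mem _ _
      (fun acc row => acc ++ (PySem.Chars.rstrip
        (pvLine words (words.length : Int) ((PySem.Int.toChars (words.length : Int)).length : Int)
          c (PySem.Int.floordiv ((words.length : Int) + c - 1) c) row) ++ ['\n'])) _ ?hfun]
  · rw [PySem.List.foldl_append_eq_flatMap]
    rfl
  · intro acc row _
    rw [pv_inner_line words (words.length : Int) _ c _ row, List.append_assoc]

theorem pv_B_inv (words : List String) (nw W : Int) (hW : 0 ≤ W) (m : Nat) :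
    (PySem.List.pyRange 0 (m : Int) 1).foldl
      (fun (st : List (List Char) × Int) c =>
        ((PySem.List.enumerate (PySem.List.slice words (some (c * W)) (some ((c + 1) * W)))).foldl
            (fun (ls : List (List Char)) iw =>
              ls.set iw.1.toNat (ls.getD iw.1.toNat []
                ++ pvRjust (PySem.Int.toChars (st.2 + iw.1 + 1)) nw
                ++ ('.' :: ' ' :: pvLjust iw.2.toList
                     (((PySem.List.slice words (some (c * W)) (some ((c + 1) * W))).map
                       (fun w => (w.toList.length : Int))).foldl max 0))
                ++ [' ', ' '])) st.1,
         st.2 + ((PySem.List.slice words (some (c * W)) (some ((c + 1) * W))).length : Int)))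
      (List.replicate W.toNat ([] : List Char), 0)
    = ((List.range W.toNat).map (fun r => pvPart words nw W m r),
       min ((m : Int) * W) (words.length : Int)) := by
  induction m with
  | zero =>
    rw [show ((0 : Nat) : Int) = 0 by simp, PySem.List.pyRange_one_eq_nil (le_refl 0)]
    simp only [List.foldl_nil]
    refine Prod.ext ?_ ?_
    · simp [pvPart, PySem.List.pyRange_one_eq_nil (le_refl 0)]
    · simp
  | succ m ih =>
    rw [show ((m + 1 : Nat) : Int) = (m : Int) + 1 by push_cast; ring,
        PySem.List.pyRange_one_succ_right (by positivity), List.foldl_append, ih]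
    simp only [List.foldl_cons, List.foldl_nil]
    have hcl : ((pvColB words W m).length : Int)
        = min (((m : Int) + 1) * W) (words.length : Int) - min ((m : Int) * W) (words.length : Int) :=
      pv_colB_len words W m (by positivity) hW
    have hlen : (pvColB words W m).length ≤ W.toNat := by
      have hmul : ((m : Int) + 1) * W = (m : Int) * W + W := by ring
      omega
    refine Prod.ext ?_ ?_
    · -- first component
      rw [PySem.List.foldl_congr_mem _ _
          (fun (ls : List (List Char)) (iw : Int × String) =>
            ls.set iw.1.toNat (ls.getD iw.1.toNat []
              ++ (pvRjust (PySem.Int.toChars (min ((m : Int) * W) (words.length : Int) + iw.1 + 1)) nw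
                ++ ('.' :: ' ' :: pvLjust iw.2.toList (pvWidthB words W m)) ++ [' ', ' ']))) _
          (by intro acc iw _
              simp [pvWidthB, pvColB, List.append_assoc])]
      have hef := pv_enum_fold
        (fun i w => pvRjust (PySem.Int.toChars (min ((m : Int) * W) (words.length : Int) + i + 1)) nw
          ++ ('.' :: ' ' :: pvLjust w.toList (pvWidthB words W m)) ++ [' ', ' '])
        (pvColB words W m) 0
        ((List.range W.toNat).map (fun r => pvPart words nw W m r))
        (by simpa using hlen)
      simp only [Nat.cast_zero, Nat.zero_add, Nat.sub_zero, Nat.zero_le, true_and] at hef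
      rw [show PySem.List.slice words (some ((m : Int) * W)) (some (((m : Int) + 1) * W))
            = pvColB words W m from rfl, hef]
      apply List.ext_getElem (by simp)
      intro r h1 h2
      simp only [List.getElem_mapIdx, List.getElem_map, List.getElem_range]
      have h1' : r < W.toNat := by simpa using h1
      have hsplit : pvPart words nw W (m + 1) r
          = pvPart words nw W m r
            ++ (if (r : Int) < ((pvColB words W m).length : Int) then pvCellB words nw W r m else []) := by
        rw [pvPart, pvPart,
            show ((m + 1 : Nat) : Int) = (m : Int) + 1 by push_cast; ring,
            PySem.List.pyRange_one_succ_right (by positivity),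
            List.filter_append, List.flatMap_append]
        simp only [List.filter_cons, List.filter_nil]
        by_cases h : (r : Int) < ((pvColB words W m).length : Int) <;> simp [h]
      rw [hsplit]
      by_cases h : r < (pvColB words W m).length
      · rw [if_pos (by omega), if_pos (by exact_mod_cast h)]
        congr 1
      · rw [if_neg (by omega), if_neg (by omega)]
        simp
    · -- second component
      have hmul : ((m : Int) + 1) * W = (m : Int) * W + W := by ring
      simp only []
      rw [show PySem.List.slice words (some ((m : Int) * W)) (some (((m : Int) + 1) * W))
            = pvColB words W m from rfl]
      omega

theorem pv_B_char (words : List String) (c : Int) (hc : 0 < c) :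
    format_seed_words_alt words c = String.ofList
      (((List.range (PySem.Int.floordiv ((words.length : Int) + c - 1) c).toNat).map
          (fun r => pvPart words ((PySem.Int.toChars (words.length : Int)).length : Int)
            (PySem.Int.floordiv ((words.length : Int) + c - 1) c) c.toNat r)).flatMap
        (fun l => PySem.Chars.rstrip l ++ ['\n'])) := by
  have hW : 0 ≤ PySem.Int.floordiv ((words.length : Int) + c - 1) c :=
    (PySem.Int.le_floordiv_iff_mul_le hc).mpr (by omega)
  have key := pv_B_inv words ((PySem.Int.toChars (words.length : Int)).length : Int)
    (PySem.Int.floordiv ((words.length : Int) + c - 1) c) hW c.toNat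
  simp only [format_seed_words_alt]
  rw [pv_ceil_eq (words.length : Int) c hc,
      show PySem.List.pyRange 0 c 1 = PySem.List.pyRange 0 ((c.toNat : Int)) 1 by
        rw [Int.toNat_of_nonneg hc.le],
      key]
  refine congrArg String.ofList ?_
  rw [pv_join_nil]
  simp [List.flatMap]

theorem pv_colB_get (words : List String) (W k : Int) (hk : 0 ≤ k) (hW : 0 ≤ W)
    (j : Nat) (hj : j < (pvColB words W k).length) :
    (pvColB words W k)[j]? = words[(k * W).toNat + j]? := by
  have h1 : (0:Int) ≤ k * W := mul_nonneg hk hW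
  have h2 : k * W ≤ (k + 1) * W := by nlinarith
  simp only [pvColB, PySem.List.slice] at hj ⊢
  rw [pv_clampIdx_of_nonneg _ _ h1, pv_clampIdx_of_nonneg _ _ (le_trans h1 h2)] at hj ⊢
  simp only [List.length_take, List.length_drop] at hj
  rw [List.getElem?_take, if_pos (by omega), List.getElem?_drop]
  congr 1
  omega

theorem pv_part_eq_line (words : List String) (nw c : Int) (hc : 0 < c)
    (hpre : (c - 1) * PySem.Int.floordiv ((words.length : Int) + c - 1) c < (words.length : Int))
    (r : Nat) (hr : (r : Int) < PySem.Int.floordiv ((words.length : Int) + c - 1) c) :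
    pvPart words nw (PySem.Int.floordiv ((words.length : Int) + c - 1) c) c.toNat r
      = pvLine words (words.length : Int) nw c (PySem.Int.floordiv ((words.length : Int) + c - 1) c) r := by
  set W := PySem.Int.floordiv ((words.length : Int) + c - 1) c with hWdef
  have hW0 : 0 ≤ W := le_trans (Int.natCast_nonneg r) hr.le
  have hkwn : ∀ k : Int, 0 ≤ k → k < c → k * W ≤ (words.length : Int) := by
    intro k h0 hkc
    calc k * W ≤ (c - 1) * W := mul_le_mul_of_nonneg_right (by omega) hW0
    _ ≤ (words.length : Int) := hpre.le
  have hguard : ∀ k : Int, 0 ≤ k → k < c →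
      (((r : Int) < ((pvColB words W k).length : Int)) ↔ ((r : Int) + k * W < (words.length : Int))) := by
    intro k h0 hkc
    have hcl := pv_colB_len words W k h0 hW0
    have hmul : (k + 1) * W = k * W + W := by ring
    have := hkwn k h0 hkc
    omega
  rw [pvPart, pvLine, show ((c.toNat : Int)) = c from Int.toNat_of_nonneg hc.le,
      List.filter_congr (q := fun k => decide ((r : Int) + k * W < (words.length : Int)))
        (by intro k hk
            obtain ⟨h0, hkc⟩ := PySem.List.mem_pyRange_one.mp hk
            simp only [decide_eq_decide]
            exact hguard k h0 hkc)]
  refine pv_flatMap_congr _ ?_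
  intro k hk
  obtain ⟨hkmem, hkg⟩ := List.mem_filter.mp hk
  obtain ⟨h0, hkc⟩ := PySem.List.mem_pyRange_one.mp hkmem
  have hg : (r : Int) + k * W < (words.length : Int) := by simpa using hkg
  have hrcol : r < (pvColB words W k).length := by
    have := (hguard k h0 hkc).mpr hg
    omega
  have hkw := hkwn k h0 hkc
  have hkW0 : (0:Int) ≤ k * W := mul_nonneg h0 hW0
  have hcl := pv_colB_len words W k h0 hW0
  have hmul : (k + 1) * W = k * W + W := by ring
  have hnum : min (k * W) ((words.length : Int)) + (r : Int) + 1 = (r : Int) + k * W + 1 := by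
    rw [min_eq_left hkw]; ring
  have hword : (pvColB words W k).getD r "" = PySem.List.pyGetD words ((r : Int) + k * W) "" := by
    have e1 := pv_colB_get words W k h0 hW0 r hrcol
    have hrw : (k * W).toNat + r < words.length := by omega
    rw [List.getD_eq_getElem?_getD, e1, List.getElem?_eq_getElem hrw, Option.getD_some,
        PySem.List.pyGetD_eq_getElem words "" (by positivity) (by omega)]
    have hidx : ((r : Int) + k * W).toNat = (k * W).toNat + r := by omega
    simp only [hidx]
  have hwidth : pvWidthB words W k = pvWidth words ((words.length : Int)) W k := by
    rw [pvWidthB, pvWidth]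
    congr 1
    apply List.ext_getElem
    · simp only [List.length_map, PySem.List.length_pyRange_one]
      omega
    · intro j h1 h2
      have hjcol : j < (pvColB words W k).length := by simpa using h1
      have hjw : (k * W).toNat + j < words.length := by omega
      have e1 := pv_colB_get words W k h0 hW0 j hjcol
      rw [List.getElem?_eq_getElem hjcol, List.getElem?_eq_getElem hjw] at e1
      simp only [List.getElem_map]
      rw [PySem.List.getElem_pyRange_one _ _ _ (by simpa using h2),
          PySem.List.pyGetD_eq_getElem words "" (by positivity) (by omega),
          Option.some.inj e1]
      have hidx : (k * W + (j : Int)).toNat = (k * W).toNat + j := by omega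
      simp only [hidx]
  rw [pvCellB, pvCell, hnum, hword, hwidth]

theorem pv_foldl_rstrip_ne_nil (f : Int → List Char) :
    ∀ (l : List Int), l ≠ [] → ∀ (acc : List Char),
    l.foldl (fun acc row => acc ++ PySem.Chars.rstrip (f row) ++ ['\n']) acc ≠ [] := by
  intro l
  induction l with
  | nil => intro h; exact absurd rfl h
  | cons x t ih =>
    intro _ acc
    cases t with
    | nil => simp
    | cons y u =>
      intro h
      exact ih (by simp) _ h

theorem pv_A_pos_len (words : List String) (c : Int) (hc : c < 0) (hn : words.length <= 1) :
    format_seed_words words c ≠ "" := by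
  have hW1 : 1 ≤ PySem.Int.floordiv ((words.length : Int) + c - 1) c := by
    have e : PySem.Int.floordiv ((words.length : Int) + c - 1) c
        = PySem.Int.floordiv (-((words.length : Int) + c - 1)) (-c) := by
      simpa using PySem.Int.floordiv_neg_neg (-((words.length : Int) + c - 1)) (-c)
    rw [e, PySem.Int.le_floordiv_iff_mul_le (by omega)]
    omega
  simp only [format_seed_words]
  intro h
  have h2 := congrArg String.toList h
  simp only [String.toList_ofList] at h2
  refine pv_foldl_rstrip_ne_nil _ _ ?_ _ h2
  rw [PySem.List.pyRange_one_cons (by omega)]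
  simp

theorem pv_pos_case (words : List String) (c : Int) (hc : 0 < c)
    (hpre : (c - 1) * PySem.Int.floordiv ((words.length : Int) + c - 1) c < (words.length : Int)) :
    format_seed_words words c = format_seed_words_alt words c := by
  rw [pv_A_char words c hc, pv_B_char words c hc]
  refine congrArg String.ofList ?_
  rw [PySem.List.pyRange_one 0 _, List.flatMap_map, List.flatMap_map]
  simp only [Int.sub_zero, Int.zero_add]
  refine pv_flatMap_congr _ ?_
  intro rn hrn
  simp only [List.mem_range] at hrn
  have hr : ((rn : Int)) < PySem.Int.floordiv ((words.length : Int) + c - 1) c := by omega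
  rw [pv_part_eq_line words _ c hc hpre rn hr]

theorem pv_neg_case_B (words : List String) (c : Int) (hc : c < 0) :
    format_seed_words_alt words c = "" := by
  have h1 : PySem.Int.floordiv (-(words.length : Int)) c
      = PySem.Int.floordiv (words.length : Int) (-c) := by
    simpa using PySem.Int.floordiv_neg_neg (words.length : Int) (-c)
  have h2 : 0 ≤ PySem.Int.floordiv (words.length : Int) (-c) :=
    (PySem.Int.le_floordiv_iff_mul_le (by omega)).mpr (by simp)
  have h3 : (-(PySem.Int.floordiv (-(words.length : Int)) c)).toNat = 0 := by omega
  have h4 : PySem.List.pyRange 0 c 1 = [] := PySem.List.pyRange_one_eq_nil (by omega)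
  simp [format_seed_words_alt, h3, h4, PySem.Chars.join, List.intercalate]

theorem pv_neg_case_A (words : List String) (c : Int) (hc : c < 0) (hn : 2 <= words.length) :
    format_seed_words words c = "" := by
  have h2 : PySem.Int.floordiv ((words.length : Int) + c - 1) c < 1 := by
    have e : PySem.Int.floordiv ((words.length : Int) + c - 1) c
        = PySem.Int.floordiv (-((words.length : Int) + c - 1)) (-c) := by
      simpa using PySem.Int.floordiv_neg_neg (-((words.length : Int) + c - 1)) (-c)
    rw [e, PySem.Int.floordiv_lt_iff_lt_mul (by omega)]
    omega
  have h3 : PySem.List.pyRange 0 (PySem.Int.floordiv ((words.length : Int) + c - 1) c) 1 = [] :=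
    PySem.List.pyRange_one_eq_nil (by omega)
  simp [format_seed_words, h3]

-- ===== VERDICT =====
theorem format_seed_words_spec : Claim_unchanged_format_seed_words := by
  intro words c _ hpre hD
  rcases lt_or_gt_of_ne hpre.1 with hneg | hpos
  · have hn : 2 ≤ words.length := by
      unfold D_format_seed_words at hD
      omega
    rw [pv_neg_case_A words c hneg hn, pv_neg_case_B words c hneg]
  · obtain ⟨hn, hp⟩ := hpre.2 hpos
    exact pv_pos_case words c hpos hp

theorem format_seed_words_changed : Claim_changed_format_seed_words := by
  unfold Claim_changed_format_seed_words; decide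

theorem format_seed_words_tight : Claim_exact_format_seed_words := by
  intro words c _ hpre hD
  obtain ⟨hneg, hlen⟩ := hD
  rw [pv_neg_case_B words c hneg]
  exact pv_A_pos_len words c hneg hlen
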